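-- pv_equiv track=rewrite | github.com/belle2/basf2 | framework/scripts/B2Tools/format.py | variable
-- ===== SOURCE A (Python) =====
-- def variable(variable_string):
--     """
--     Adds hyphenations after brackets, and for common variables.
--         @param variable_string variable name
--         @return string with hyphenation hints for latex
--     """
--     substitutes = {
--         '=': r'=\allowbreak ',
--         '_': r'\_\allowbreak ',
--         ':': r':\allowbreak ',
--         '(': r'(\allowbreak ',
--         'extraInfo': r'ex\-tra\-In\-fo',
--         'SignalProbability': r'Sig\-nal\-Prob\-a\-bil\-i\-ty',
--         'cosAngleBetweenMomentumAndVertexVector': r'cosAngle\-Between\-Momentum\-And\-Vertex\-Vector'}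
--     for key, value in substitutes.items():
--         variable_string = variable_string.replace(key, value)
--     return variable_string
-- ===== SOURCE B (Python) =====
-- import re
--
-- def variable(variable_string):
--     """
--     Adds hyphenations after brackets, and for common variables.
--         @param variable_string variable name
--         @return string with hyphenation hints for latex
--     """
--     substitutes = {
--         '=': r'=\allowbreak ',
--         '_': r'\_\allowbreak ',
--         ':': r':\allowbreak ',
--         '(': r'(\allowbreak ',
--         'extraInfo': r'ex\-tra\-In\-fo',
--         'SignalProbability': r'Sig\-nal\-Prob\-a\-bil\-i\-ty',
--         'cosAngleBetweenMomentumAndVertexVector': r'cosAngle\-Between\-Momentum\-And\-Vertex\-Vector'}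
--     pattern = re.compile('|'.join(re.escape(key) for key in substitutes))
--     return pattern.sub(lambda m: substitutes[m.group(0)], variable_string)
-- ===== Notes on version B (the rewrite author's own statement) =====
-- stated objective: idiomatic
-- what changed: Replaces the seven sequential full-string .replace passes (one per dict entry) by a single compiled regex alternation of the escaped keys with a callback substitution, i.e. one left-to-right scan over the input; equivalent because the keys never overlap and no replacement value contains a key still to be processed.
import Mathlib
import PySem

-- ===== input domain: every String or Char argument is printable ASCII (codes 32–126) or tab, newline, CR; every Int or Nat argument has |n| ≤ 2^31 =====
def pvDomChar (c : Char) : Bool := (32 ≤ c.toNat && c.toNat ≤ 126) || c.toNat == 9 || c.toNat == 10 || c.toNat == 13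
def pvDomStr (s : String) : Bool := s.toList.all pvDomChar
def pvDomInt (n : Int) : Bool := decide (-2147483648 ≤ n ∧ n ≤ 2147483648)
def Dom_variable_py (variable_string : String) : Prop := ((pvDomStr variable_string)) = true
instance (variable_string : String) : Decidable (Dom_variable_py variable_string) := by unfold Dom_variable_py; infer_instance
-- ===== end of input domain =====

-- B replaces A's seven sequential full-string .replace passes by ONE left-to-right scan
-- (a compiled regex alternation of the escaped keys with a callback); same return value.

-- ===== PORT A =====
-- the substitutes dict, in insertion order (its .items())
def pvSubstitutesA : List (String × String) :=
  [("=", "=\\allowbreak "),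
   ("_", "\\_\\allowbreak "),
   (":", ":\\allowbreak "),
   ("(", "(\\allowbreak "),
   ("extraInfo", "ex\\-tra\\-In\\-fo"),
   ("SignalProbability", "Sig\\-nal\\-Prob\\-a\\-bil\\-i\\-ty"),
   ("cosAngleBetweenMomentumAndVertexVector", "cosAngle\\-Between\\-Momentum\\-And\\-Vertex\\-Vector")]

def variable_py (variable_string : String) : String :=
  pvSubstitutesA.foldl (fun s kv => PySem.Str.replace s kv.1 kv.2) variable_string

-- ===== PORT B =====
-- A table entry: a key stored as (first char, rest) — every regex alternative is a
-- nonempty literal — paired with its replacement value.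
abbrev PvEntry : Type := (Char × List Char) × List Char

-- first alternative of the pattern that matches at the current position (regex
-- alternation tries the branches in the listed order)
def pvFindMatch : List PvEntry → List Char → Option PvEntry
  | [], _ => none
  | e :: es, s => if (e.1.1 :: e.1.2).isPrefixOf s then some e else pvFindMatch es s

-- pattern.sub(callback, s) for an alternation of literal keys: one left-to-right scan;
-- at each position emit the first matching key's value and skip it, else copy the char.
-- (hand port of re.sub; exact for an alternation of escaped literal strings)
def pvScan (tab : List PvEntry) : List Char → List Char
  | [] => []
  | c :: t =>
    match pvFindMatch tab (c :: t) with
    | some e => e.2 ++ pvScan tab (t.drop e.1.2.length)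
    | none => c :: pvScan tab t
  termination_by s => s.length
  decreasing_by
  all_goals simp [List.length_drop]

-- the compiled table: escaped keys of the dict, in order, with their values
def pvTabB : List PvEntry :=
  [(('=', []), "=\\allowbreak ".toList),
   (('_', []), "\\_\\allowbreak ".toList),
   ((':', []), ":\\allowbreak ".toList),
   (('(', []), "(\\allowbreak ".toList),
   (('e', "xtraInfo".toList), "ex\\-tra\\-In\\-fo".toList),
   (('S', "ignalProbability".toList), "Sig\\-nal\\-Prob\\-a\\-bil\\-i\\-ty".toList),
   (('c', "osAngleBetweenMomentumAndVertexVector".toList), "cosAngle\\-Between\\-Momentum\\-And\\-Vertex\\-Vector".toList)]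

def variable_py_alt (variable_string : String) : String :=
  String.ofList (pvScan pvTabB variable_string.toList)

-- ===== PRECONDITION & SPEC =====
def Spec_variable_py (variable_string : String) (out : String) : Prop := out = variable_py_alt variable_string
instance (variable_string : String) (out : String) : Decidable (Spec_variable_py variable_string out) := by unfold Spec_variable_py; infer_instance

-- ===== CLAIM (what is proved, stated in full; the proofs are below) =====
def Claim_equal_variable_py : Prop := ∀ (variable_string : String), Dom_variable_py variable_string → Spec_variable_py variable_string (variable_py variable_string)

-- ===== LEMMAS AND PROOFS =====

-- the key of a table entry
def pvKey (e : PvEntry) : List Char := e.1.1 :: e.1.2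

-- one Python str.replace pass with a nonempty key (k0 :: kr), as structural recursion
def pvRep1 (k0 : Char) (kr v : List Char) : List Char → List Char
  | [] => []
  | c :: t =>
    if (k0 :: kr).isPrefixOf (c :: t) then v ++ pvRep1 k0 kr v (t.drop kr.length)
    else c :: pvRep1 k0 kr v t
  termination_by s => s.length
  decreasing_by
  all_goals simp [List.length_drop]

lemma pvRep1_nil (k0 : Char) (kr v : List Char) : pvRep1 k0 kr v [] = [] := by
  simp [pvRep1]

lemma pvRep1_cons (k0 : Char) (kr v : List Char) (c : Char) (t : List Char) :
    pvRep1 k0 kr v (c :: t) =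
      if (k0 :: kr).isPrefixOf (c :: t) then v ++ pvRep1 k0 kr v (t.drop kr.length)
      else c :: pvRep1 k0 kr v t := by
  rw [pvRep1]

lemma pvScan_nil (tab : List PvEntry) : pvScan tab [] = [] := by simp [pvScan]

lemma pvScan_cons (tab : List PvEntry) (c : Char) (t : List Char) :
    pvScan tab (c :: t) =
      match pvFindMatch tab (c :: t) with
      | some e => e.2 ++ pvScan tab (t.drop e.1.2.length)
      | none => c :: pvScan tab t := by
  rw [pvScan]

lemma pvScan_nil_tab : ∀ s : List Char, pvScan [] s = s := by
  intro s
  induction s with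
  | nil => simp [pvScan_nil]
  | cons c t ih => rw [pvScan_cons]; simp [pvFindMatch, ih]

lemma pvFindMatch_mem {tab : List PvEntry} {s : List Char} {e : PvEntry}
    (h : pvFindMatch tab s = some e) : e ∈ tab := by
  induction tab with
  | nil => simp [pvFindMatch] at h
  | cons e' es ih =>
    rw [pvFindMatch] at h
    split at h
    · simp at h; simp [h]
    · exact List.mem_cons_of_mem _ (ih h)

lemma pvFindMatch_prefix {tab : List PvEntry} {s : List Char} {e : PvEntry}
    (h : pvFindMatch tab s = some e) : pvKey e <+: s := by
  induction tab with
  | nil => simp [pvFindMatch] at h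
  | cons e' es ih =>
    rw [pvFindMatch] at h
    split at h
    · rename_i hp
      simp at h
      subst h
      exact List.isPrefixOf_iff_prefix.mp hp
    · exact ih h

lemma pvFindMatch_none_of {tab : List PvEntry} {s : List Char}
    (h : ∀ e ∈ tab, ¬ pvKey e <+: s) : pvFindMatch tab s = none := by
  induction tab with
  | nil => rfl
  | cons e' es ih =>
    rw [pvFindMatch]
    rw [if_neg]
    · exact ih fun e he => h e (List.mem_cons_of_mem _ he)
    · intro hp
      exact h e' (List.mem_cons_self) (List.isPrefixOf_iff_prefix.mp hp)

lemma pvFindMatch_of_none {tab : List PvEntry} {s : List Char}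
    (h : pvFindMatch tab s = none) : ∀ e ∈ tab, ¬ pvKey e <+: s := by
  induction tab with
  | nil => simp
  | cons e' es ih =>
    rw [pvFindMatch] at h
    split at h
    · simp at h
    · rename_i hp
      intro e he
      rcases List.mem_cons.mp he with rfl | he'
      · intro hpre
        exact hp (List.isPrefixOf_iff_prefix.mpr hpre)
      · exact ih h e he'

-- if the found entry's key is laid down at the head, the same entry is found again
lemma pvFindMatch_again {tab : List PvEntry} {s : List Char} {e : PvEntry}
    (hpair : tab.Pairwise (fun a b => ¬ pvKey a <+: pvKey b ∧ ¬ pvKey b <+: pvKey a))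
    (h : pvFindMatch tab s = some e) (w : List Char) :
    pvFindMatch tab (pvKey e ++ w) = some e := by
  induction tab with
  | nil => simp [pvFindMatch] at h
  | cons e' es ih =>
    rw [pvFindMatch] at h ⊢
    split at h
    · simp at h
      subst h
      rw [if_pos]
      exact List.isPrefixOf_iff_prefix.mpr (List.prefix_append _ _)
    · rename_i hp
      have hmem : e ∈ es := pvFindMatch_mem h
      have hrel := (List.pairwise_cons.mp hpair).1 e hmem
      rw [if_neg]
      · exact ih (List.pairwise_cons.mp hpair).2 h
      · intro hpre
        have hpre' : pvKey e' <+: pvKey e ++ w := List.isPrefixOf_iff_prefix.mp hpre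
        rcases List.prefix_or_prefix_of_prefix hpre' (List.prefix_append _ _) with h1 | h1
        · exact hrel.1 h1
        · exact hrel.2 h1

-- a replace pass leaves a prefix alone when the key matches nowhere inside it
lemma pvSkip (k0 : Char) (kr v : List Char) :
    ∀ (pfx s : List Char), pfx <+: s →
      (∀ p < pfx.length, ¬ (k0 :: kr) <+: s.drop p) →
      pvRep1 k0 kr v s = pfx ++ pvRep1 k0 kr v (s.drop pfx.length) := by
  intro pfx
  induction pfx with
  | nil => intro s _ _; simp
  | cons c pfx' ih =>
    intro s hpre hnm
    obtain ⟨rest, hrest⟩ := hpre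
    subst hrest
    rw [List.cons_append, pvRep1_cons, if_neg (fun hp =>
      hnm 0 (by simp) (by simpa using List.isPrefixOf_iff_prefix.mp hp))]
    rw [ih (pfx' ++ rest) (List.prefix_append _ _) (fun p hp => by
      have := hnm (p + 1) (by simp; omega)
      simpa using this)]
    simp

-- scanning a block none of whose positions can start a key just copies the block
lemma pvBlock (tab : List PvEntry) :
    ∀ (v' w : List Char),
      (∀ e ∈ tab, ∀ p < v'.length, ¬ pvKey e <+: v'.drop p ∧ ¬ v'.drop p <+: pvKey e) →
      pvScan tab (v' ++ w) = v' ++ pvScan tab w := by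
  intro v'
  induction v' with
  | nil => intro w _; simp
  | cons c v'' ih =>
    intro w hyp
    have hnone : pvFindMatch tab (c :: (v'' ++ w)) = none := by
      apply pvFindMatch_none_of
      intro e he hpre
      have h0 := hyp e he 0 (by simp)
      rcases List.prefix_or_prefix_of_prefix hpre
          (show (c :: v'') <+: (c :: v'') ++ w from List.prefix_append _ _) with h1 | h1
      · exact h0.1 (by simpa using h1)
      · exact h0.2 (by simpa using h1)
    rw [List.cons_append, pvScan_cons, hnone]
    simp only []
    rw [ih w (fun e he p hp => by
      have := hyp e he (p + 1) (by simp; omega)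
      simpa using this)]
    simp

-- a replace pass with key k preserves "kj matches at the head" when k does not match
-- at the head, provided kj's proper suffixes overlap neither v nor k
lemma pvPref (k0 : Char) (kr v : List Char) :
    ∀ (s : List Char), ¬ (k0 :: kr) <+: s →
      ∀ (kj : List Char),
        (∀ q < kj.length, 0 < q →
          ¬ kj.drop q <+: v ∧ ¬ v <+: kj.drop q ∧
          ¬ kj.drop q <+: (k0 :: kr) ∧ ¬ (k0 :: kr) <+: kj.drop q) →
        (kj <+: pvRep1 k0 kr v s ↔ kj <+: s) := by
  intro s
  induction s with
  | nil => intro _ kj _; rw [pvRep1_nil]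
  | cons c t ih =>
    intro hk kj hyp
    rw [pvRep1_cons, if_neg (fun hp => hk (List.isPrefixOf_iff_prefix.mp hp))]
    cases kj with
    | nil => simp
    | cons d kj' =>
      by_cases hd : d = c
      · subst hd
        simp only [List.cons_prefix_cons, true_and]
        by_cases hkj' : kj' = []
        · subst hkj'; simp
        · have hq1 := hyp 1 (by
            cases kj' with
            | nil => exact absurd rfl hkj'
            | cons _ _ => simp) (by omega)
          simp only [List.drop_succ_cons, List.drop_zero] at hq1
          by_cases hkt : (k0 :: kr) <+: t
          · -- the key matches at the head of t : both sides are false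
            cases t with
            | nil => simp at hkt
            | cons c2 t2 =>
              rw [pvRep1_cons, if_pos (List.isPrefixOf_iff_prefix.mpr hkt)]
              constructor
              · intro hpre
                exfalso
                rcases List.prefix_or_prefix_of_prefix hpre (List.prefix_append _ _) with h1 | h1
                · exact hq1.1 h1
                · exact hq1.2.1 h1
              · intro hpre
                exfalso
                rcases List.prefix_or_prefix_of_prefix hpre hkt with h1 | h1
                · exact hq1.2.2.1 h1
                · exact hq1.2.2.2 h1
          · exact ih hkt kj' (fun q hq hq0 => by
              have := hyp (q + 1) (by simp; omega) (by omega)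
              simpa using this)
      · constructor
        · intro hpre
          exact absurd (List.cons_prefix_cons.mp hpre).1 hd
        · intro hpre
          exact absurd (List.cons_prefix_cons.mp hpre).1 hd

-- the master step: one replace pass for the first key, then scanning with the
-- remaining keys, equals scanning with all keys
lemma pvMaster (k0 : Char) (kr v : List Char) (tab : List PvEntry)
    (h1 : ∀ e ∈ tab, ∀ p < v.length, ¬ pvKey e <+: v.drop p ∧ ¬ v.drop p <+: pvKey e)
    (h2 : ∀ e ∈ tab, ∀ q < (pvKey e).length, 0 < q →
      ¬ (pvKey e).drop q <+: v ∧ ¬ v <+: (pvKey e).drop q ∧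
      ¬ (pvKey e).drop q <+: (k0 :: kr) ∧ ¬ (k0 :: kr) <+: (pvKey e).drop q)
    (h4 : tab.Pairwise (fun a b => ¬ pvKey a <+: pvKey b ∧ ¬ pvKey b <+: pvKey a)) :
    ∀ s : List Char, pvScan tab (pvRep1 k0 kr v s) = pvScan (((k0, kr), v) :: tab) s := by
  have main : ∀ n : ℕ, ∀ s : List Char, s.length ≤ n →
      pvScan tab (pvRep1 k0 kr v s) = pvScan (((k0, kr), v) :: tab) s := by
    intro n
    induction n with
    | zero =>
      intro s hs
      have : s = [] := List.eq_nil_of_length_eq_zero (Nat.le_zero.mp hs)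
      subst this
      simp [pvRep1_nil, pvScan_nil]
    | succ n ihn =>
      intro s hs
      cases s with
      | nil => simp [pvRep1_nil, pvScan_nil]
      | cons c t =>
        by_cases hk : (k0 :: kr) <+: (c :: t)
        · -- the first key matches at the head
          rw [pvRep1_cons, if_pos (List.isPrefixOf_iff_prefix.mpr hk)]
          rw [pvBlock tab v _ (fun e he p hp => h1 e he p hp)]
          rw [ihn _ (by simp [List.length_drop] at *; omega)]
          rw [pvScan_cons]
          rw [show pvFindMatch (((k0, kr), v) :: tab) (c :: t) = some ((k0, kr), v) by
            rw [pvFindMatch, if_pos (List.isPrefixOf_iff_prefix.mpr hk)]]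
        · cases hm : pvFindMatch tab (c :: t) with
          | none =>
            have hall := pvFindMatch_of_none hm
            rw [pvRep1_cons, if_neg (fun hp => hk (List.isPrefixOf_iff_prefix.mp hp))]
            have hnone2 : pvFindMatch tab (c :: pvRep1 k0 kr v t) = none := by
              apply pvFindMatch_none_of
              intro e he
              have hiff := pvPref k0 kr v (c :: t) hk (pvKey e)
                (fun q hq hq0 => h2 e he q hq hq0)
              rw [pvRep1_cons, if_neg (fun hp => hk (List.isPrefixOf_iff_prefix.mp hp))] at hiff
              rw [hiff]
              exact hall e he
            rw [pvScan_cons, hnone2]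
            simp only []
            rw [ihn t (by simpa using Nat.lt_succ_iff.mp (by simpa using hs))]
            rw [pvScan_cons (((k0, kr), v) :: tab)]
            rw [show pvFindMatch (((k0, kr), v) :: tab) (c :: t) = none by
              rw [pvFindMatch, if_neg (fun hp => hk (List.isPrefixOf_iff_prefix.mp hp)), hm]]
          | some e =>
            have hpre : pvKey e <+: (c :: t) := pvFindMatch_prefix hm
            have hmem : e ∈ tab := pvFindMatch_mem hm
            -- the replace pass copies the matched key verbatim
            have hskip : pvRep1 k0 kr v (c :: t)
                = pvKey e ++ pvRep1 k0 kr v ((c :: t).drop (pvKey e).length) := by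
              apply pvSkip k0 kr v (pvKey e) (c :: t) hpre
              intro p hp
              rcases Nat.eq_zero_or_pos p with rfl | hp0
              · simpa using hk
              · obtain ⟨rest, hrest⟩ := hpre
                intro habs
                rw [← hrest, List.drop_append_of_le_length (Nat.le_of_lt hp)] at habs
                have h2e := h2 e hmem p hp hp0
                rcases List.prefix_or_prefix_of_prefix habs
                    (List.prefix_append _ _) with h1' | h1'
                · exact h2e.2.2.2 h1'
                · exact h2e.2.2.1 h1'
            set X := pvRep1 k0 kr v ((c :: t).drop (pvKey e).length) with hX
            have hsplit : pvKey e ++ X = e.1.1 :: (e.1.2 ++ X) := by simp [pvKey]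
            have hagain : pvFindMatch tab (e.1.1 :: (e.1.2 ++ X)) = some e := by
              simpa [pvKey] using pvFindMatch_again h4 hm X
            rw [hskip, hsplit, pvScan_cons, hagain]
            simp only []
            rw [show (e.1.2 ++ X).drop e.1.2.length = X from by simp]
            have hlen : ((c :: t).drop (pvKey e).length).length ≤ n := by
              simp [List.length_drop, pvKey] at *
              omega
            rw [ihn _ hlen]
            rw [pvScan_cons (((k0, kr), v) :: tab)]
            rw [show pvFindMatch (((k0, kr), v) :: tab) (c :: t) = some e by
              rw [pvFindMatch, if_neg (fun hp => hk (List.isPrefixOf_iff_prefix.mp hp)), hm]]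
            simp only []
            rw [show (c :: t).drop (pvKey e).length = t.drop e.1.2.length by
              simp [pvKey]]
  intro s
  exact main s.length s le_rfl

-- PySem's str.replace (fuel + accumulator) computes pvRep1 for a nonempty key
lemma pvReplaceGo (k0 : Char) (kr v : List Char) :
    ∀ (fuel : ℕ) (l acc : List Char), l.length ≤ fuel →
      PySem.Chars.replace.go (k0 :: kr) v fuel l acc = acc.reverse ++ pvRep1 k0 kr v l := by
  intro fuel
  induction fuel with
  | zero =>
    intro l acc hl
    have : l = [] := List.eq_nil_of_length_eq_zero (Nat.le_zero.mp hl)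
    subst this
    simp [PySem.Chars.replace.go, pvRep1_nil]
  | succ n ih =>
    intro l acc hl
    cases l with
    | nil => simp [PySem.Chars.replace.go, pvRep1_nil]
    | cons c t =>
      rw [PySem.Chars.replace.go]
      rw [pvRep1_cons]
      by_cases hp : (k0 :: kr).isPrefixOf (c :: t)
      · rw [if_pos hp, if_pos hp]
        have hdrop : (c :: t).drop (k0 :: kr).length = t.drop kr.length := by simp
        rw [hdrop, ih _ _ (by simp [List.length_drop] at *; omega)]
        simp
      · rw [if_neg hp, if_neg hp, ih _ _ (by simpa using Nat.lt_succ_iff.mp (by simpa using hl))]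
        simp

lemma pvReplace_eq (k0 : Char) (kr v : List Char) (s : List Char) :
    PySem.Chars.replace s (k0 :: kr) v = pvRep1 k0 kr v s := by
  rw [PySem.Chars.replace]
  rw [if_neg (by simp)]
  rw [pvReplaceGo k0 kr v s.length s [] le_rfl]
  simp

-- ===== VERDICT (by name: the statement is the Claim_ definition above) =====
theorem variable_py_spec : Claim_equal_variable_py := by
  intro s _
  unfold Spec_variable_py variable_py_alt
  have key : (variable_py s).toList = pvScan pvTabB s.toList := by
    have m1 := pvMaster '=' [] "=\\allowbreak ".toList
      [(('_', []), "\\_\\allowbreak ".toList),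
       ((':', []), ":\\allowbreak ".toList),
       (('(', []), "(\\allowbreak ".toList),
       (('e', "xtraInfo".toList), "ex\\-tra\\-In\\-fo".toList),
       (('S', "ignalProbability".toList), "Sig\\-nal\\-Prob\\-a\\-bil\\-i\\-ty".toList),
       (('c', "osAngleBetweenMomentumAndVertexVector".toList), "cosAngle\\-Between\\-Momentum\\-And\\-Vertex\\-Vector".toList)]
      (by decide) (by decide) (by decide)
    have m2 := pvMaster '_' [] "\\_\\allowbreak ".toList
      [((':', []), ":\\allowbreak ".toList),
       (('(', []), "(\\allowbreak ".toList),
       (('e', "xtraInfo".toList), "ex\\-tra\\-In\\-fo".toList),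
       (('S', "ignalProbability".toList), "Sig\\-nal\\-Prob\\-a\\-bil\\-i\\-ty".toList),
       (('c', "osAngleBetweenMomentumAndVertexVector".toList), "cosAngle\\-Between\\-Momentum\\-And\\-Vertex\\-Vector".toList)]
      (by decide) (by decide) (by decide)
    have m3 := pvMaster ':' [] ":\\allowbreak ".toList
      [(('(', []), "(\\allowbreak ".toList),
       (('e', "xtraInfo".toList), "ex\\-tra\\-In\\-fo".toList),
       (('S', "ignalProbability".toList), "Sig\\-nal\\-Prob\\-a\\-bil\\-i\\-ty".toList),
       (('c', "osAngleBetweenMomentumAndVertexVector".toList), "cosAngle\\-Between\\-Momentum\\-And\\-Vertex\\-Vector".toList)]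
      (by decide) (by decide) (by decide)
    have m4 := pvMaster '(' [] "(\\allowbreak ".toList
      [(('e', "xtraInfo".toList), "ex\\-tra\\-In\\-fo".toList),
       (('S', "ignalProbability".toList), "Sig\\-nal\\-Prob\\-a\\-bil\\-i\\-ty".toList),
       (('c', "osAngleBetweenMomentumAndVertexVector".toList), "cosAngle\\-Between\\-Momentum\\-And\\-Vertex\\-Vector".toList)]
      (by decide) (by decide) (by decide)
    have m5 := pvMaster 'e' "xtraInfo".toList "ex\\-tra\\-In\\-fo".toList
      [(('S', "ignalProbability".toList), "Sig\\-nal\\-Prob\\-a\\-bil\\-i\\-ty".toList),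
       (('c', "osAngleBetweenMomentumAndVertexVector".toList), "cosAngle\\-Between\\-Momentum\\-And\\-Vertex\\-Vector".toList)]
      (by decide) (by decide) (by decide)
    have m6 := pvMaster 'S' "ignalProbability".toList "Sig\\-nal\\-Prob\\-a\\-bil\\-i\\-ty".toList
      [(('c', "osAngleBetweenMomentumAndVertexVector".toList), "cosAngle\\-Between\\-Momentum\\-And\\-Vertex\\-Vector".toList)]
      (by decide) (by decide) (by decide)
    have m7 := pvMaster 'c' "osAngleBetweenMomentumAndVertexVector".toList "cosAngle\\-Between\\-Momentum\\-And\\-Vertex\\-Vector".toList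
      [] (by decide) (by decide) (by decide)
    simp only [variable_py, pvSubstitutesA, List.foldl_cons, List.foldl_nil,
      PySem.Str.toList_replace]
    rw [show ("=" : String).toList = '=' :: [] from rfl,
        show ("_" : String).toList = '_' :: [] from rfl,
        show (":" : String).toList = ':' :: [] from rfl,
        show ("(" : String).toList = '(' :: [] from rfl,
        show ("extraInfo" : String).toList = 'e' :: ("xtraInfo" : String).toList from rfl,
        show ("SignalProbability" : String).toList = 'S' :: ("ignalProbability" : String).toList from rfl,
        show ("cosAngleBetweenMomentumAndVertexVector" : String).toList
          = 'c' :: ("osAngleBetweenMomentumAndVertexVector" : String).toList from rfl]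
    simp only [pvReplace_eq]
    simp only [pvTabB]
    rw [← m1 s.toList, ← m2 _, ← m3 _, ← m4 _, ← m5 _, ← m6 _, ← m7 _, pvScan_nil_tab]
  calc variable_py s = String.ofList (variable_py s).toList := String.ofList_toList.symm
    _ = String.ofList (pvScan pvTabB s.toList) := by rw [key]
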